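-- pv_equiv track=rewrite | github.com/bartelsj-code/AdventOfCode2024 | Day9/Puzzle2/solver.py | find_next_slot
-- ===== SOURCE A (Python) =====
-- def find_next_slot(index, size, disk):
--     #given an index and a size, looks for and returns the index of the next gap in disk of that size. If not found, returns none
--     i = index + 1
--     while i < len(disk):
--         j = 0
--         while disk[i+j] == None:
--             j += 1
--             if j == size:
--                 return i
--             if i+j >= len(disk):
--                 return None
--         i = i+j + 1
--     return None
-- ===== SOURCE B (Python) =====
-- def find_next_slot(index, size, disk):
--     run = 0
--     for i in range(index + 1, len(disk)):
--         if disk[i] == None: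
--             run += 1
--             if run == size:
--                 return i - size + 1
--         else:
--             run = 0
--     return None
-- ===== Notes on version B (the rewrite author's own statement) =====
-- stated objective: simpler
-- what changed: A's two nested while loops (an inner scan measuring each gap, plus a jump-ahead of the outer index) are replaced by one flat for-loop over positions keeping a single run-length counter of consecutive None cells.
import Mathlib
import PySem

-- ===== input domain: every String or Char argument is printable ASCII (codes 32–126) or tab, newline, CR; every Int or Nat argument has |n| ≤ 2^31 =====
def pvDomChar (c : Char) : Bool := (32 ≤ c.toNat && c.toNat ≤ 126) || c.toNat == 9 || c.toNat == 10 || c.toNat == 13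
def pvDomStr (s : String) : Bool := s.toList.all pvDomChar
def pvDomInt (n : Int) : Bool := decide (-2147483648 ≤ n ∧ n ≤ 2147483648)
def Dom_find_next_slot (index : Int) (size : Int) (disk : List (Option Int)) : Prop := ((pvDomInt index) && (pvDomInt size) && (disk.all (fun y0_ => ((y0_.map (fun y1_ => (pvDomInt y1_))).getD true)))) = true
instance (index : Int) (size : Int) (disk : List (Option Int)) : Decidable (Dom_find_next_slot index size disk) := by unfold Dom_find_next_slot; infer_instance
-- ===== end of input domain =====

-- B replaces A's two nested while loops (inner gap scan + jump-ahead) by a single flat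
-- scan with a run-length counter; objective: simpler. Same O(n) cost.

-- ===== PORT A =====
-- inner while loop of A: state (i, j), about to evaluate `disk[i+j] == None`.
-- A's j starts at 0 and only increments, so it is carried as a Nat (its Int value is ↑j).
-- `Sum.inl r` = the inner loop returned r from the function; `Sum.inr j` = the inner
-- loop exited normally with counter j (A then sets i := i+j+1).
-- pyGet? = none is Python's IndexError (excluded by Pre_); the port yields Sum.inl none there.
def pvInnerA (size : Int) (disk : List (Option Int)) (i : Int) (j : Nat) : (Option Int) ⊕ Nat :=
  match PySem.List.pyGet? disk (i + (j : Int)) with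
  | some none =>
      if (j : Int) + 1 = size then Sum.inl (some i)
      else if i + ((j : Int) + 1) ≥ (disk.length : Int) then Sum.inl none
      else pvInnerA size disk i (j + 1)
  | some (some _) => Sum.inr j
  | none => Sum.inl none
termination_by ((disk.length : Int) - (i + (j : Int))).toNat
decreasing_by omega

-- outer while loop of A
def pvOuterA (size : Int) (disk : List (Option Int)) (i : Int) : Option Int :=
  if i < (disk.length : Int) then
    match pvInnerA size disk i 0 with
    | Sum.inl r => r
    | Sum.inr j => pvOuterA size disk (i + (j : Int) + 1)
  else none
termination_by ((disk.length : Int) - i).toNat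
decreasing_by omega

def find_next_slot (index : Int) (size : Int) (disk : List (Option Int)) : Option Int :=
  pvOuterA size disk (index + 1)

-- ===== PORT B =====
-- single flat scan: position i, run = length of current run of consecutive None cells
def pvGoB (size : Int) (disk : List (Option Int)) (i : Int) (run : Int) : Option Int :=
  if i < (disk.length : Int) then
    match PySem.List.pyGet? disk i with
    | some none =>
        if run + 1 = size then some (i - size + 1)
        else pvGoB size disk (i + 1) (run + 1)
    | some (some _) => pvGoB size disk (i + 1) 0
    | none => none
  else none
termination_by ((disk.length : Int) - i).toNat
decreasing_by
  · omega
  · omega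

def find_next_slot_alt (index : Int) (size : Int) (disk : List (Option Int)) : Option Int :=
  pvGoB size disk (index + 1) 0

-- ===== PRECONDITION & SPEC =====
-- Pre_ excludes exactly the inputs where A raises IndexError (index+1 below -len(disk),
-- so the very first read disk[index+1] is out of range); B raises there too.
def Pre_find_next_slot (index : Int) (size : Int) (disk : List (Option Int)) : Prop :=
  -(disk.length : Int) ≤ index + 1
instance (index : Int) (size : Int) (disk : List (Option Int)) : Decidable (Pre_find_next_slot index size disk) := by unfold Pre_find_next_slot; infer_instance

def pvWitness_find_next_slot : Int × Int × List (Option Int) := (0, 2, [some 1, none, none])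

def Spec_find_next_slot (index : Int) (size : Int) (disk : List (Option Int)) (out : Option Int) : Prop := out = find_next_slot_alt index size disk
instance (index : Int) (size : Int) (disk : List (Option Int)) (out : Option Int) : Decidable (Spec_find_next_slot index size disk out) := by unfold Spec_find_next_slot; infer_instance

-- ===== CLAIM (what is proved, stated in full; the proofs are below) =====
def Claim_equal_find_next_slot : Prop := ∀ (index : Int) (size : Int) (disk : List (Option Int)), Dom_find_next_slot index size disk → Pre_find_next_slot index size disk → Spec_find_next_slot index size disk (find_next_slot index size disk)

-- ===== LEMMAS AND PROOFS =====

-- core invariant, proved simultaneously for both of A's loops by strong induction on the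
-- remaining length: A's inner-loop state (i, j) (followed, on normal exit, by the outer
-- loop) computes the same value as B's flat scan at position i+j with run counter j, and
-- A's outer loop at i computes the same value as B's scan at i with run counter 0.
theorem pvLoop_eq (size : Int) (disk : List (Option Int)) :
    ∀ (n : Nat),
      (∀ (i : Int) (j : Nat), ((disk.length : Int) - (i + (j : Int))).toNat = n →
        i + (j : Int) < (disk.length : Int) →
        (match pvInnerA size disk i j with
         | Sum.inl r => r
         | Sum.inr jf => pvOuterA size disk (i + (jf : Int) + 1)) =
          pvGoB size disk (i + (j : Int)) (j : Int)) ∧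
      (∀ (i : Int), ((disk.length : Int) - i).toNat = n →
        pvOuterA size disk i = pvGoB size disk i 0) := by
  intro n
  induction n using Nat.strong_induction_on with
  | _ n ih =>
    have hin : ∀ (i : Int) (j : Nat), ((disk.length : Int) - (i + (j : Int))).toNat = n →
        i + (j : Int) < (disk.length : Int) →
        (match pvInnerA size disk i j with
         | Sum.inl r => r
         | Sum.inr jf => pvOuterA size disk (i + (jf : Int) + 1)) =
          pvGoB size disk (i + (j : Int)) (j : Int) := by
      intro i j hn hlt
      rw [pvInnerA, pvGoB, if_pos hlt]
      cases hg : PySem.List.pyGet? disk (i + (j : Int)) with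
      | none => simp
      | some o =>
        cases o with
        | none =>
          by_cases h1 : (j : Int) + 1 = size
          · simp only [h1, if_pos]
            congr 1
            omega
          · by_cases h2 : i + ((j : Int) + 1) ≥ (disk.length : Int)
            · simp only [h1, h2, if_pos, if_false]
              rw [pvGoB, if_neg (by omega)]
            · simp only [h1, h2, if_false]
              have := (ih (((disk.length : Int) - (i + ((j : Int) + 1))).toNat) (by omega)).1
                i (j + 1) (by push_cast; ring_nf) (by push_cast; omega)
              push_cast at this
              rw [show i + ((j : Int) + 1) = i + (j : Int) + 1 from by ring] at this
              exact this
        | some x =>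
          simp only []
          have := (ih (((disk.length : Int) - (i + (j : Int) + 1)).toNat) (by omega)).2
            (i + (j : Int) + 1) rfl
          simpa using this
    refine ⟨hin, ?_⟩
    intro i hn
    rw [pvOuterA]
    by_cases hlt : i < (disk.length : Int)
    · rw [if_pos hlt]
      have H := hin i 0 (by simpa using hn) (by simpa using hlt)
      simpa using H
    · rw [if_neg hlt, pvGoB, if_neg hlt]

-- ===== VERDICT (by name: the statement is the Claim_ definition above) =====
theorem find_next_slot_spec : Claim_equal_find_next_slot := by
  intro index size disk _hdom _hpre
  unfold Spec_find_next_slot find_next_slot find_next_slot_alt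
  exact (pvLoop_eq size disk (((disk.length : Int) - (index + 1)).toNat)).2 (index + 1) rfl
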